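-- pv_equiv track=rewrite | github.com/maskhuang/CompGen | workflow/lib/orthogroup_utils.py | calculate_species_overlap
-- ===== SOURCE A (Python) =====
-- from collections import defaultdict
--
-- def calculate_species_overlap(records: list[dict]) -> dict[str, dict[str, int]]:
--     """
--     Calculate species overlap matrix: shared orthogroup counts between species pairs.
--
--     The matrix is symmetric. Diagonal values represent the total number of
--     orthogroups each species participates in.
--
--     Args:
--         records: Long-format records from parse_orthogroups_tsv.
--
--     Returns:
--         Nested dict: matrix[species_a][species_b] = shared orthogroup count.
--     """
--     if not records:
--         return {}
--
--     # Build orthogroup → set of species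
--     og_species: dict[str, set[str]] = defaultdict(set)
--     for rec in records:
--         og_species[rec["orthogroup_id"]].add(rec["species_id"])
--
--     all_species = sorted({rec["species_id"] for rec in records})
--
--     # Initialize matrix
--     matrix: dict[str, dict[str, int]] = {
--         sp: {sp2: 0 for sp2 in all_species}
--         for sp in all_species
--     }
--
--     # Count shared orthogroups
--     for species_set in og_species.values():
--         species_list = sorted(species_set)
--         for i, s1 in enumerate(species_list):
--             for s2 in species_list[i:]:
--                 matrix[s1][s2] += 1
--                 if s1 != s2:
--                     matrix[s2][s1] += 1
--
--     return matrix
-- ===== SOURCE B (Python) =====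
-- def calculate_species_overlap(records: list[dict]) -> dict[str, dict[str, int]]:
--     """Species-keyed index + pairwise set-intersection sizing (instead of
--     per-orthogroup co-occurrence accumulation)."""
--     if not records:
--         return {}
--
--     species_ogs: dict[str, set[str]] = {}
--     for rec in records:
--         species_ogs.setdefault(rec["species_id"], set()).add(rec["orthogroup_id"])
--
--     all_species = sorted(species_ogs)
--     return {
--         s1: {s2: len(species_ogs[s1] & species_ogs[s2]) for s2 in all_species}
--         for s1 in all_species
--     }
-- ===== Notes on version B (the rewrite author's own statement) =====
-- stated objective: simpler
-- what changed: Replaces A's per-orthogroup nested increment loops over a dense pre-zeroed matrix with a species-keyed index (species -> set of orthogroups) and a direct pairwise grid of set-intersection sizes.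
import Mathlib
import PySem

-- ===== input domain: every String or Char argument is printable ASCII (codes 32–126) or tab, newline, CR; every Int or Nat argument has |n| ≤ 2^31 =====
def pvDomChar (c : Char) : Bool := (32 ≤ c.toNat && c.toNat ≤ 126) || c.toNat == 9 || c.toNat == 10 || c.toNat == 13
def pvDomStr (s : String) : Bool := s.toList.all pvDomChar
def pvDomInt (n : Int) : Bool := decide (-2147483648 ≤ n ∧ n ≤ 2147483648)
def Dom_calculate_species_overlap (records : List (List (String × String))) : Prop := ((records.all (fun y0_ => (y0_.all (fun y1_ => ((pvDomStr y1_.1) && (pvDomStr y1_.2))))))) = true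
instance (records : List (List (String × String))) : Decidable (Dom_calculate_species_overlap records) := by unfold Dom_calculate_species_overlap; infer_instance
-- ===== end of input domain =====

-- B replaces A's per-orthogroup nested increment loops over a pre-zeroed dense matrix by a
-- species-keyed index and a direct pairwise grid of set-intersection sizes (objective: simpler).

-- rec["k"]: first-match lookup in the record's association list ("" is never read under Pre_)
def pvGetKey (rec : List (String × String)) (k : String) : String :=
  (PySem.Dict.mk rec).getD k ""
-- ===== PORT A =====
def calculate_species_overlap (records : List (List (String × String))) : List (String × List (String × Int)) :=
  if records = [] then []
  else
    let og_species : PySem.Dict String (PySem.Set String) :=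
      records.foldl (fun d rec =>
        d.modify (pvGetKey rec "orthogroup_id") [] (fun s => PySem.Set.add s (pvGetKey rec "species_id")))
        PySem.Dict.empty
    let all_species : List String :=
      PySem.List.sorted (PySem.Set.ofList (records.map (fun rec => pvGetKey rec "species_id"))) (fun x => x) false
    let matrix : PySem.Dict String (PySem.Dict String Int) :=
      all_species.foldl (fun m sp =>
        m.insert sp (all_species.foldl (fun r sp2 => r.insert sp2 0) PySem.Dict.empty)) PySem.Dict.empty
    let matrix :=
      og_species.values.foldl (fun m species_set =>
        let species_list := PySem.List.sorted species_set (fun x => x) false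
        (PySem.List.enumerate species_list).foldl (fun m p =>
          (PySem.List.slice species_list (some p.1) none).foldl (fun m s2 =>
            let m1 := m.modify p.2 PySem.Dict.empty (fun row => row.modify s2 0 (· + 1))
            if p.2 ≠ s2 then m1.modify s2 PySem.Dict.empty (fun row => row.modify p.2 0 (· + 1)) else m1)
            m) m) matrix
    matrix.items.map (fun q => (q.1, q.2.items))

-- ===== PORT B =====
def calculate_species_overlap_alt (records : List (List (String × String))) : List (String × List (String × Int)) :=
  if records = [] then []
  else
    let species_ogs : PySem.Dict String (PySem.Set String) :=
      records.foldl (fun d rec =>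
        d.modify (pvGetKey rec "species_id") [] (fun s => PySem.Set.add s (pvGetKey rec "orthogroup_id")))
        PySem.Dict.empty
    let all_species : List String := PySem.List.sorted species_ogs.keys (fun x => x) false
    all_species.map (fun s1 => (s1,
      all_species.map (fun s2 => (s2,
        PySem.Set.len (PySem.Set.inter (species_ogs.getD s1 []) (species_ogs.getD s2 []))))))

-- ===== PRECONDITION & SPEC =====
-- Pre_ excludes exactly the records lacking an "orthogroup_id" or "species_id" key, on which A raises KeyError.
def Pre_calculate_species_overlap (records : List (List (String × String))) : Prop :=
  ∀ rec ∈ records, (PySem.Dict.mk rec).contains "orthogroup_id" = true ∧ (PySem.Dict.mk rec).contains "species_id" = true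
instance (records : List (List (String × String))) : Decidable (Pre_calculate_species_overlap records) := by
  unfold Pre_calculate_species_overlap; infer_instance
def pvWitness_calculate_species_overlap : (List (List (String × String))) :=
  [[("orthogroup_id", "OG1"), ("species_id", "spA")], [("orthogroup_id", "OG1"), ("species_id", "spB")]]

def Spec_calculate_species_overlap (records : List (List (String × String))) (out : List (String × List (String × Int))) : Prop := out = calculate_species_overlap_alt records
instance (records : List (List (String × String))) (out : List (String × List (String × Int))) : Decidable (Spec_calculate_species_overlap records out) := by unfold Spec_calculate_species_overlap; infer_instance

-- ===== CLAIM (what is proved, stated in full; the proofs are below) =====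
def Claim_equal_calculate_species_overlap : Prop := ∀ (records : List (List (String × String))), Dom_calculate_species_overlap records → Pre_calculate_species_overlap records → Spec_calculate_species_overlap records (calculate_species_overlap records)

-- ===== LEMMAS AND PROOFS =====

def GridP (S : List String) (M : PySem.Dict String (PySem.Dict String Int)) (f : String → String → Int) : Prop :=
  M.items = S.map (fun a => (a, PySem.Dict.mk (S.map (fun b => (b, f a b)))))
lemma grouping (l : List (List (String × String))) (k v : List (String × String) → String)
    (d : PySem.Dict String (PySem.Set String)) (g : String) :
    (l.foldl (fun d r => d.modify (k r) [] (fun s => PySem.Set.add s (v r))) d).getD g []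
      = ((l.filter (fun r => k r == g)).map v).foldl PySem.Set.add (d.getD g []) := by
  induction l generalizing d with
  | nil => rfl
  | cons r t ih =>
    simp only [List.foldl_cons, List.filter_cons]
    rw [ih]
    by_cases h : k r = g
    · simp [h, PySem.Dict.getD_modify_self]
    · simp [h]
      rw [PySem.Dict.getD_modify_of_ne]
      exact fun hh => h hh.symm

lemma gridP_congr {S M f f'} (h : GridP S M f)
    (hff : ∀ a ∈ S, ∀ b ∈ S, f a b = f' a b) : GridP S M f' := by
  unfold GridP at *
  rw [h]
  apply List.map_congr_left
  intro a ha
  refine Prod.ext rfl ?_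
  refine congrArg PySem.Dict.mk ?_
  apply List.map_congr_left
  intro b hb
  rw [hff a ha b hb]

lemma gridP_keys {S M f} (h : GridP S M f) : M.keys = S := by
  unfold PySem.Dict.keys
  rw [h, List.map_map]
  simp [Function.comp_def]
lemma grid_row_getD {S : List String} (hS : S.Nodup) (f : String → String → Int)
    {a b : String} (hb : b ∈ S) :
    (PySem.Dict.mk (S.map (fun b => (b, f a b)))).getD b 0 = f a b := by
  apply PySem.Dict.getD_of_mem_items
  · exact List.mem_map_of_mem hb
  · unfold PySem.Dict.keys
    simp only [List.map_map]
    simpa [Function.comp_def] using hS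
lemma gridP_getD {S M f} (hS : S.Nodup) (h : GridP S M f) {a : String} (ha : a ∈ S) :
    M.getD a PySem.Dict.empty = PySem.Dict.mk (S.map (fun b => (b, f a b))) := by
  apply PySem.Dict.getD_of_mem_items
  · rw [h]; exact List.mem_map_of_mem ha
  · rw [gridP_keys h]; exact hS

lemma gridP_inc {S M f} (hS : S.Nodup) (h : GridP S M f) {s1 s2 : String}
    (h1 : s1 ∈ S) (h2 : s2 ∈ S) :
    GridP S (M.modify s1 PySem.Dict.empty (fun row => row.modify s2 0 (· + 1)))
      (fun a b => if a = s1 ∧ b = s2 then f a b + 1 else f a b) := by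
  have hrow : M.getD s1 PySem.Dict.empty = PySem.Dict.mk (S.map (fun b => (b, f s1 b))) :=
    gridP_getD hS h h1
  have hcont : M.contains s1 = true := by
    rw [PySem.Dict.contains_iff_mem_keys, gridP_keys h]; exact h1
  have hrowcont : (PySem.Dict.mk (S.map (fun b => (b, f s1 b)))).contains s2 = true := by
    rw [PySem.Dict.contains_iff_mem_keys]
    unfold PySem.Dict.keys
    simp only [List.map_map]
    simpa [Function.comp_def] using h2
  have hrowget : (PySem.Dict.mk (S.map (fun b => (b, f s1 b)))).getD s2 0 = f s1 s2 :=
    grid_row_getD hS f h2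
  unfold GridP
  unfold PySem.Dict.modify
  rw [hrow]
  beta_reduce
  rw [hrowget]
  rw [PySem.Dict.items_insert_of_contains _ _ hcont, h]
  rw [List.map_map]
  apply List.map_congr_left
  intro a ha
  by_cases has : a = s1
  · subst has
    simp only [Function.comp_def, beq_self_eq_true, if_true]
    refine Prod.ext rfl ?_
    apply PySem.Dict.ext
    rw [PySem.Dict.items_insert_of_contains _ _ hrowcont]
    show _ = PySem.Dict.items (PySem.Dict.mk _)
    rw [List.map_map]
    apply List.map_congr_left
    intro b hb
    by_cases hbs : b = s2
    · subst hbs; simp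
    · have : (b == s2) = false := beq_false_of_ne hbs
      simp [hbs]
  · have : (a == s1) = false := beq_false_of_ne has
    simp only [Function.comp_def, this, if_false, Bool.false_eq_true]
    refine Prod.ext rfl ?_
    refine congrArg PySem.Dict.mk ?_
    apply List.map_congr_left
    intro b hb
    simp [has]

lemma inner_loop {S : List String} (hS : S.Nodup) (l : List String) (hnd : l.Nodup) (s1 : String)
    (h1 : s1 ∈ S) (hl : ∀ x ∈ l, x ∈ S) {M f} (h : GridP S M f) :
    GridP S (l.foldl (fun m s2 =>
        let m1 := m.modify s1 PySem.Dict.empty (fun row => row.modify s2 0 (· + 1))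
        if s1 ≠ s2 then m1.modify s2 PySem.Dict.empty (fun row => row.modify s1 0 (· + 1)) else m1) M)
      (fun a b => f a b + (if a = s1 ∧ b ∈ l then 1 else 0) + (if b = s1 ∧ a ∈ l ∧ a ≠ s1 then 1 else 0)) := by
  induction l generalizing M f with
  | nil =>
    apply gridP_congr h
    intro a _ b _
    simp
  | cons s2 t ih =>
    have hs2 : s2 ∈ S := hl s2 (List.mem_cons_self)
    have ht : ∀ x ∈ t, x ∈ S := fun x hx => hl x (List.mem_cons_of_mem _ hx)
    have hs2t : s2 ∉ t := (List.nodup_cons.mp hnd).1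
    have hndt : t.Nodup := (List.nodup_cons.mp hnd).2
    simp only [List.foldl_cons]
    have hM1 := gridP_inc hS h h1 hs2
    by_cases hss : s1 = s2
    · subst hss
      simp only [ne_eq, not_true_eq_false, ite_false]
      have := ih hndt ht hM1
      apply gridP_congr this
      intro a ha b hb
      clear ih this hM1 h hl hS ha hb
      simp only [List.mem_cons]
      by_cases ha1 : a = s1 <;> by_cases hb1 : b = s1 <;>
        by_cases hat : a ∈ t <;> by_cases hbt : b ∈ t <;> simp_all
    · simp only [ne_eq, hss, not_false_eq_true, if_true]
      have hM2 := gridP_inc hS hM1 hs2 h1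
      have := ih hndt ht hM2
      apply gridP_congr this
      intro a ha b hb
      clear ih this hM1 hM2 h hl hS ha hb
      simp only [List.mem_cons]
      by_cases ha1 : a = s1 <;> by_cases hb1 : b = s1 <;>
        by_cases ha2 : a = s2 <;> by_cases hb2 : b = s2 <;>
        by_cases hat : a ∈ t <;> by_cases hbt : b ∈ t <;> simp_all

lemma enumerate_succ_shift {α : Type} (xs : List α) (s : Int) :
    PySem.List.enumerate xs (s + 1) = (PySem.List.enumerate xs s).map (fun p => (p.1 + 1, p.2)) := by
  induction xs generalizing s with
  | nil => rfl
  | cons x t ih =>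
    rw [PySem.List.enumerate_cons, PySem.List.enumerate_cons, List.map_cons, ih (s + 1)]

lemma outer_loop {S : List String} (hS : S.Nodup) (L : List String) (hnd : L.Nodup)
    (hL : ∀ x ∈ L, x ∈ S) {M f} (h : GridP S M f) :
    GridP S ((PySem.List.enumerate L).foldl (fun m p =>
        (PySem.List.slice L (some p.1) none).foldl (fun m s2 =>
          let m1 := m.modify p.2 PySem.Dict.empty (fun row => row.modify s2 0 (· + 1))
          if p.2 ≠ s2 then m1.modify s2 PySem.Dict.empty (fun row => row.modify p.2 0 (· + 1)) else m1)
          m) M)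
      (fun a b => f a b + (if a ∈ L ∧ b ∈ L then 1 else 0)) := by
  induction L generalizing M f with
  | nil =>
    apply gridP_congr h
    intro a _ b _
    simp
  | cons s1 t ih =>
    have hs1 : s1 ∈ S := hL s1 List.mem_cons_self
    have ht : ∀ x ∈ t, x ∈ S := fun x hx => hL x (List.mem_cons_of_mem _ hx)
    have hs1t : s1 ∉ t := (List.nodup_cons.mp hnd).1
    have hndt : t.Nodup := (List.nodup_cons.mp hnd).2
    rw [PySem.List.enumerate_cons, List.foldl_cons]
    have hslice0 : PySem.List.slice (s1 :: t) (some (0 : Int)) none = s1 :: t := by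
      simp [PySem.List.slice_none_none]
    have hshift : ∀ (M2 : PySem.Dict String (PySem.Dict String Int)),
        (PySem.List.enumerate t (0 + 1)).foldl (fun m p =>
          (PySem.List.slice (s1 :: t) (some p.1) none).foldl (fun m s2 =>
            let m1 := m.modify p.2 PySem.Dict.empty (fun row => row.modify s2 0 (· + 1))
            if p.2 ≠ s2 then m1.modify s2 PySem.Dict.empty (fun row => row.modify p.2 0 (· + 1)) else m1)
            m) M2
        = (PySem.List.enumerate t).foldl (fun m p =>
          (PySem.List.slice t (some p.1) none).foldl (fun m s2 =>
            let m1 := m.modify p.2 PySem.Dict.empty (fun row => row.modify s2 0 (· + 1))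
            if p.2 ≠ s2 then m1.modify s2 PySem.Dict.empty (fun row => row.modify p.2 0 (· + 1)) else m1)
            m) M2 := by
      intro M2
      rw [enumerate_succ_shift, List.foldl_map]
      apply PySem.List.foldl_congr_mem
      intro acc p hp
      obtain ⟨k, hk, rfl⟩ := (PySem.List.mem_enumerate_iff _ _ _).mp hp
      have hsl : PySem.List.slice (s1 :: t) (some ((0 + (k : Int)) + 1)) none
          = PySem.List.slice t (some (0 + (k : Int))) none := by
        rw [show ((0 + (k : Int)) + 1) = ((k + 1 : Nat) : Int) by omega,
            show (0 + (k : Int)) = ((k : Nat) : Int) by omega,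
            PySem.List.slice_from_natCast, PySem.List.slice_from_natCast]
        rfl
      simp only [hsl]
    rw [hshift]
    have hstep := inner_loop hS (s1 :: t) hnd s1 hs1 hL h
    rw [hslice0] at *
    have hrest := ih hndt ht hstep
    apply gridP_congr hrest
    intro a ha b hb
    clear hrest hstep ih h hshift hL hS ha hb
    simp only [List.mem_cons]
    by_cases ha1 : a = s1 <;> by_cases hb1 : b = s1 <;>
      by_cases hat : a ∈ t <;> by_cases hbt : b ∈ t <;> simp_all

lemma values_loop {S : List String} (hS : S.Nodup) (vs : List (PySem.Set String))
    (hvs : ∀ X ∈ vs, X.Nodup ∧ ∀ x ∈ X, x ∈ S) {M f} (h : GridP S M f) :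
    GridP S (vs.foldl (fun m X =>
        let species_list := PySem.List.sorted X (fun x => x) false
        (PySem.List.enumerate species_list).foldl (fun m p =>
          (PySem.List.slice species_list (some p.1) none).foldl (fun m s2 =>
            let m1 := m.modify p.2 PySem.Dict.empty (fun row => row.modify s2 0 (· + 1))
            if p.2 ≠ s2 then m1.modify s2 PySem.Dict.empty (fun row => row.modify p.2 0 (· + 1)) else m1)
            m) m) M)
      (fun a b => f a b + ((vs.filter (fun X => decide (a ∈ X) && decide (b ∈ X))).length : Int)) := by
  induction vs generalizing M f with
  | nil =>
    apply gridP_congr h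
    intro a _ b _
    simp
  | cons X t ih =>
    obtain ⟨hXnd, hXS⟩ := hvs X List.mem_cons_self
    have hts : ∀ Y ∈ t, Y.Nodup ∧ ∀ x ∈ Y, x ∈ S := fun Y hY => hvs Y (List.mem_cons_of_mem _ hY)
    simp only [List.foldl_cons]
    have hLnd : (PySem.List.sorted X (fun x => x) false).Nodup :=
      ((PySem.List.sorted_perm X (fun x => x) false).nodup_iff).mpr hXnd
    have hLS : ∀ x ∈ PySem.List.sorted X (fun x => x) false, x ∈ S := by
      intro x hx
      exact hXS x ((PySem.List.mem_sorted _ _ _ _).mp hx)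
    have hstep := outer_loop hS (PySem.List.sorted X (fun x => x) false) hLnd hLS h
    have hrest := ih hts hstep
    apply gridP_congr hrest
    intro a ha b hb
    clear hrest hstep ih h hS ha hb
    have hmemL : ∀ y, y ∈ PySem.List.sorted X (fun x => x) false ↔ y ∈ X :=
      fun y => PySem.List.mem_sorted _ _ _ _
    rw [List.filter_cons]
    by_cases hc : a ∈ X ∧ b ∈ X
    · simp [hmemL, hc.1, hc.2]
      ring
    · have hff : ¬ (a ∈ PySem.List.sorted X (fun x => x) false ∧ b ∈ PySem.List.sorted X (fun x => x) false) := by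
        rw [hmemL, hmemL]; exact hc
      rw [if_neg hff, if_neg (by simpa using hc : ¬ ((decide (a ∈ X) && decide (b ∈ X)) = true))]
      ring

lemma grid_init {S : List String} (hS : S.Nodup) :
    GridP S (S.foldl (fun m sp =>
        m.insert sp (S.foldl (fun r sp2 => r.insert sp2 0) PySem.Dict.empty)) PySem.Dict.empty)
      (fun _ _ => (0 : Int)) := by
  unfold GridP
  rw [PySem.Dict.items_foldl_insert_fresh S (fun sp => sp) _ PySem.Dict.empty
      (fun a _ => rfl) (by simpa using hS)]
  have hrow : (S.foldl (fun r sp2 => r.insert sp2 (0 : Int)) PySem.Dict.empty).items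
      = S.map (fun b => (b, (0 : Int))) := by
    rw [PySem.Dict.items_foldl_insert_fresh S (fun sp => sp) _ PySem.Dict.empty
        (fun a _ => rfl) (by simpa using hS)]
    rfl
  apply List.map_congr_left
  intro a _
  refine Prod.ext rfl ?_
  apply PySem.Dict.ext
  rw [hrow]

def ogid (rec : List (String × String)) : String := pvGetKey rec "orthogroup_id"
def spid (rec : List (String × String)) : String := pvGetKey rec "species_id"
def ogSet (records : List (List (String × String))) (g : String) : PySem.Set String :=
  PySem.Set.ofList ((records.filter (fun r => ogid r == g)).map spid)
def spSet (records : List (List (String × String))) (s : String) : PySem.Set String :=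
  PySem.Set.ofList ((records.filter (fun r => spid r == s)).map ogid)

lemma mem_ogSet (records : List (List (String × String))) (g x : String) :
    x ∈ ogSet records g ↔ ∃ r ∈ records, ogid r = g ∧ spid r = x := by
  unfold ogSet
  rw [PySem.Set.mem_ofList]
  simp only [List.mem_map, List.mem_filter, beq_iff_eq]
  constructor
  · rintro ⟨r, ⟨hr, hg⟩, hx⟩; exact ⟨r, hr, hg, hx⟩
  · rintro ⟨r, hr, hg, hx⟩; exact ⟨r, ⟨hr, hg⟩, hx⟩

lemma mem_spSet (records : List (List (String × String))) (s x : String) :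
    x ∈ spSet records s ↔ ∃ r ∈ records, spid r = s ∧ ogid r = x := by
  unfold spSet
  rw [PySem.Set.mem_ofList]
  simp only [List.mem_map, List.mem_filter, beq_iff_eq]
  constructor
  · rintro ⟨r, ⟨hr, hg⟩, hx⟩; exact ⟨r, hr, hg, hx⟩
  · rintro ⟨r, hr, hg, hx⟩; exact ⟨r, ⟨hr, hg⟩, hx⟩

lemma entry_eq (records : List (List (String × String))) (a b : String) :
    (((PySem.Set.ofList (records.map ogid)).filter
        (fun g => decide (a ∈ ogSet records g) && decide (b ∈ ogSet records g))).length : Int)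
      = PySem.Set.len (PySem.Set.inter (spSet records a) (spSet records b)) := by
  unfold PySem.Set.len PySem.Set.inter
  congr 1
  apply List.Perm.length_eq
  apply (List.perm_ext_iff_of_nodup _ _).mpr
  · intro g
    simp only [List.mem_filter, PySem.Set.mem_ofList, List.mem_map,
      Bool.and_eq_true, decide_eq_true_eq, PySem.Set.contains_iff]
    rw [mem_spSet, mem_spSet]
    constructor
    · rintro ⟨⟨r0, hr0, hg0⟩, ⟨ha, hb⟩⟩
      obtain ⟨r1, hr1, h1, h2⟩ := (mem_ogSet records g a).mp ha
      obtain ⟨r2, hr2, h3, h4⟩ := (mem_ogSet records g b).mp hb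
      exact ⟨⟨r1, hr1, h2, h1⟩, ⟨r2, hr2, h4, h3⟩⟩
    · rintro ⟨⟨r1, hr1, h1, h2⟩, ⟨r2, hr2, h3, h4⟩⟩
      refine ⟨⟨r1, hr1, h2⟩, ?_, ?_⟩
      · exact (mem_ogSet records g a).mpr ⟨r1, hr1, h2, h1⟩
      · exact (mem_ogSet records g b).mpr ⟨r2, hr2, h4, h3⟩
  · exact (PySem.Set.nodup_ofList _).filter _
  · exact List.Nodup.filter _ (PySem.Set.nodup_ofList _)

theorem main_eq (records : List (List (String × String))) :
    calculate_species_overlap records = calculate_species_overlap_alt records := by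
  by_cases hnil : records = []
  · simp [calculate_species_overlap, calculate_species_overlap_alt, hnil]
  · simp only [calculate_species_overlap, calculate_species_overlap_alt, if_neg hnil]
    -- the species list both sides sort
    have hkeysB : (records.foldl (fun d rec =>
        d.modify (pvGetKey rec "species_id") [] (fun s => PySem.Set.add s (pvGetKey rec "orthogroup_id")))
        PySem.Dict.empty).keys = PySem.Set.ofList (records.map (fun rec => pvGetKey rec "species_id")) := by
      rw [PySem.Dict.keys_foldl_modify_key records (fun rec => pvGetKey rec "species_id") []
        (fun _ rec => fun s => PySem.Set.add s (pvGetKey rec "orthogroup_id")) PySem.Dict.empty]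
      rw [PySem.Dict.keys_empty, PySem.Set.update_nil_left]
    rw [hkeysB]
    set S : List String :=
      PySem.List.sorted (PySem.Set.ofList (records.map (fun rec => pvGetKey rec "species_id"))) (fun x => x) false with hSdef
    have hS : S.Nodup :=
      ((PySem.List.sorted_perm _ _ _).nodup_iff).mpr (PySem.Set.nodup_ofList _)
    have hmemS : ∀ x, x ∈ S ↔ ∃ r ∈ records, spid r = x := by
      intro x
      rw [hSdef, PySem.List.mem_sorted, PySem.Set.mem_ofList]
      simp only [List.mem_map]
      constructor
      · rintro ⟨r, hr, hx⟩; exact ⟨r, hr, hx⟩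
      · rintro ⟨r, hr, hx⟩; exact ⟨r, hr, hx⟩
    -- A side: og_species keys / values
    have hkeysA : (records.foldl (fun d rec =>
        d.modify (pvGetKey rec "orthogroup_id") [] (fun s => PySem.Set.add s (pvGetKey rec "species_id")))
        PySem.Dict.empty).keys = PySem.Set.ofList (records.map ogid) := by
      rw [PySem.Dict.keys_foldl_modify_key records (fun rec => pvGetKey rec "orthogroup_id") []
        (fun _ rec => fun s => PySem.Set.add s (pvGetKey rec "species_id")) PySem.Dict.empty]
      rw [PySem.Dict.keys_empty, PySem.Set.update_nil_left]
      rfl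
    have hgetA : ∀ g, (records.foldl (fun d rec =>
        d.modify (pvGetKey rec "orthogroup_id") [] (fun s => PySem.Set.add s (pvGetKey rec "species_id")))
        PySem.Dict.empty).getD g [] = ogSet records g := by
      intro g
      rw [grouping records (fun rec => pvGetKey rec "orthogroup_id") (fun rec => pvGetKey rec "species_id")
        PySem.Dict.empty g]
      rw [PySem.Dict.getD_empty]
      rw [← PySem.Set.ofList_eq_foldl]
      rfl
    have hgetB : ∀ sp, (records.foldl (fun d rec =>
        d.modify (pvGetKey rec "species_id") [] (fun s => PySem.Set.add s (pvGetKey rec "orthogroup_id")))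
        PySem.Dict.empty).getD sp [] = spSet records sp := by
      intro sp
      rw [grouping records (fun rec => pvGetKey rec "species_id") (fun rec => pvGetKey rec "orthogroup_id")
        PySem.Dict.empty sp]
      rw [PySem.Dict.getD_empty]
      rw [← PySem.Set.ofList_eq_foldl]
      rfl
    have hndA : (records.foldl (fun d rec =>
        d.modify (pvGetKey rec "orthogroup_id") [] (fun s => PySem.Set.add s (pvGetKey rec "species_id")))
        PySem.Dict.empty).keys.Nodup := by
      rw [hkeysA]; exact PySem.Set.nodup_ofList _
    have hvalsA : (records.foldl (fun d rec =>
        d.modify (pvGetKey rec "orthogroup_id") [] (fun s => PySem.Set.add s (pvGetKey rec "species_id")))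
        PySem.Dict.empty).values = (PySem.Set.ofList (records.map ogid)).map (fun g => ogSet records g) := by
      rw [PySem.Dict.values_eq_map_keys _ hndA ([] : PySem.Set String), hkeysA]
      apply List.map_congr_left
      intro g _
      exact hgetA g
    -- initial grid
    have hinit := grid_init hS
    -- counting fold
    have hvs : ∀ X ∈ (PySem.Set.ofList (records.map ogid)).map (fun g => ogSet records g),
        X.Nodup ∧ ∀ x ∈ X, x ∈ S := by
      intro X hX
      obtain ⟨g, _, rfl⟩ := List.mem_map.mp hX
      refine ⟨PySem.Set.nodup_ofList _, ?_⟩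
      intro x hx
      obtain ⟨r, hr, _, hsp⟩ := (mem_ogSet records g x).mp hx
      exact (hmemS x).mpr ⟨r, hr, hsp⟩
    have hfold := values_loop hS ((PySem.Set.ofList (records.map ogid)).map (fun g => ogSet records g)) hvs hinit
    unfold GridP at hfold
    rw [hvalsA, hfold, List.map_map]
    apply List.map_congr_left
    intro a ha
    simp only [Function.comp_def]
    refine Prod.ext rfl ?_
    show List.map _ S = List.map _ S
    apply List.map_congr_left
    intro b hb
    refine Prod.ext rfl ?_
    show (0:Int) + _ = _
    rw [hgetB a, hgetB b, List.filter_map, List.length_map, zero_add]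
    exact entry_eq records a b

-- ===== VERDICT (by name: the statement is the Claim_ definition above) =====
theorem calculate_species_overlap_spec : Claim_equal_calculate_species_overlap := by
  intro records _ _
  unfold Spec_calculate_species_overlap
  exact main_eq records
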